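-- pv_equiv track=rewrite | github.com/dylangilson/Advent_of_Code | 2025/Day 9/main.py | build_boundaries
-- ===== SOURCE A (Python) =====
-- from itertools import combinations, pairwise
-- from collections import defaultdict
--
-- def build_boundaries(red_tiles):
--     vertical_segments = defaultdict(list)
--     horizontal_segments = defaultdict(list)
--
--     for (x1, y1), (x2, y2) in pairwise(red_tiles + [red_tiles[0]]):
--         if x1 == x2:
--             vertical_segments[x1].append((min(y1, y2), max(y1, y2)))
--         else:
--             horizontal_segments[y1].append((min(x1, x2), max(x1, x2)))
--
--     horizontal_points = defaultdict(set)
--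
--     for y in horizontal_segments:
--         horizontal_points[y] = { x for x1, x2 in horizontal_segments[y] for x in range(x1, x2 + 1) }
--
--     vertical_points = defaultdict(set)
--
--     for x in vertical_segments:
--         vertical_points[x] = { y for y1, y2 in vertical_segments[x] for y in range(y1, y2 + 1) }
--
--     return vertical_segments, horizontal_segments, horizontal_points, vertical_points
-- ===== SOURCE B (Python) =====
-- from collections import defaultdict
--
-- def _group(entries):
--     # first-occurrence key order; each key's segments collected by its own scan
--     return {k: [seg for k2, seg in entries if k2 == k]
--             for k in dict.fromkeys(k for k, _ in entries)}
--
-- def _points(segs):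
--     return {p for lo, hi in segs for p in range(lo, hi + 1)}
--
-- def build_boundaries(red_tiles):
--     closed = red_tiles + red_tiles[:1]
--     edges = list(zip(closed, closed[1:]))
--     ventries = [(x1, (min(y1, y2), max(y1, y2))) for (x1, y1), (x2, y2) in edges if x1 == x2]
--     hentries = [(y1, (min(x1, x2), max(x1, x2))) for (x1, y1), (x2, y2) in edges if x1 != x2]
--     vertical_segments = defaultdict(list, _group(ventries))
--     horizontal_segments = defaultdict(list, _group(hentries))
--     horizontal_points = defaultdict(set, {y: _points(segs) for y, segs in horizontal_segments.items()})
--     vertical_points = defaultdict(set, {x: _points(segs) for x, segs in vertical_segments.items()})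
--     return vertical_segments, horizontal_segments, horizontal_points, vertical_points
-- ===== Notes on version B (the rewrite author's own statement) =====
-- stated objective: alternative
-- what changed: B materialises the closed boundary's edge list, partitions it into tagged (line, segment) entry lists, and builds each dict by a per-key comprehension (dict.fromkeys for first-occurrence key order, one scan of the entries per key) instead of A's single accumulation pass into defaultdicts; point sets come from the grouped segment lists; results are wrapped back into defaultdicts to keep A's return API.
-- crash fix: On the empty list A raises IndexError (red_tiles[0]); B returns four empty dicts. — e.g. on build_boundaries([]): A raises IndexError, B returns ([], [], [], [])
import Mathlib
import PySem

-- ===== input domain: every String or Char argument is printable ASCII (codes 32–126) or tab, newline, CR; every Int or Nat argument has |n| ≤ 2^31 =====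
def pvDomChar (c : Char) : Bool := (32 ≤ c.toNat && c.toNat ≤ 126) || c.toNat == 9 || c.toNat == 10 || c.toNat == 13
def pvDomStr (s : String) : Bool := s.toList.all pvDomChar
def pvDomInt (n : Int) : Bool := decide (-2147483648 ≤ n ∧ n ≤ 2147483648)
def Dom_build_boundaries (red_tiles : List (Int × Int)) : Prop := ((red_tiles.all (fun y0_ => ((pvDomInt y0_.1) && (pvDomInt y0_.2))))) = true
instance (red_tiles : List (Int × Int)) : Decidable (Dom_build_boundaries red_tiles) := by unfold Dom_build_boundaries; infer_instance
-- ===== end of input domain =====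

-- B replaces A's single accumulation pass into defaultdicts by: materialise the edge list, partition it into
-- tagged (line, segment) entry lists, then build each dict per key (dict.fromkeys key order, one scan per key);
-- objective: alternative. The proven equivalence is about the return value.

-- ===== PORT A =====
-- `range(lo, hi + 1)` as both Pythons expand a segment into points
def pvRangeOf (p : Int × Int) : List Int := PySem.List.pyRange p.1 (p.2 + 1) 1

-- the body of A's first loop over pairwise(red_tiles + [red_tiles[0]])
def pvStepA (st : PySem.Dict Int (List (Int × Int)) × PySem.Dict Int (List (Int × Int)))
    (e : (Int × Int) × (Int × Int)) :
    PySem.Dict Int (List (Int × Int)) × PySem.Dict Int (List (Int × Int)) :=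
  let ((x1, y1), (x2, y2)) := e
  if x1 = x2 then
    (st.1.modify x1 [] (· ++ [(min y1 y2, max y1 y2)]), st.2)
  else
    (st.1, st.2.modify y1 [] (· ++ [(min x1 x2, max x1 x2)]))

-- A's `for y in segments: points[y] = { x for x1, x2 in segments[y] for x in range(x1, x2+1) }`
def pvPointsLoop (d : PySem.Dict Int (List (Int × Int))) : PySem.Dict Int (List Int) :=
  d.keys.foldl
    (fun acc k => acc.insert k (PySem.Set.ofList ((d.getD k []).flatMap pvRangeOf)))
    PySem.Dict.empty

def build_boundaries (red_tiles : List (Int × Int)) :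
    (List (Int × List (Int × Int))) × (List (Int × List (Int × Int))) × (List (Int × List Int)) × (List (Int × List Int)) :=
  let ext := red_tiles ++ [PySem.List.pyGetD red_tiles 0 ((0 : Int), (0 : Int))]
  let sg := (ext.zip ext.tail).foldl pvStepA (PySem.Dict.empty, PySem.Dict.empty)
  let horizontal_points := pvPointsLoop sg.2
  let vertical_points := pvPointsLoop sg.1
  (sg.1.items, sg.2.items, horizontal_points.items, vertical_points.items)

-- ===== PORT B =====
-- B's _group: `{k: [seg for k2, seg in entries if k2 == k] for k in dict.fromkeys(k for k, _ in entries)}`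
def pvGroup (entries : List (Int × (Int × Int))) : List (Int × List (Int × Int)) :=
  (PySem.List.dedup (entries.map (·.1))).map
    (fun k => (k, (entries.filter (fun p => p.1 == k)).map (·.2)))

-- B's _points: `{p for lo, hi in segs for p in range(lo, hi + 1)}`
def pvPoints (segs : List (Int × Int)) : List Int :=
  PySem.Set.ofList (segs.flatMap pvRangeOf)

def build_boundaries_alt (red_tiles : List (Int × Int)) :
    (List (Int × List (Int × Int))) × (List (Int × List (Int × Int))) × (List (Int × List Int)) × (List (Int × List Int)) :=
  let closed := red_tiles ++ PySem.List.slice red_tiles none (some 1)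
  let edges := closed.zip closed.tail
  let ventries := edges.filterMap
    (fun e => if e.1.1 = e.2.1 then some (e.1.1, (min e.1.2 e.2.2, max e.1.2 e.2.2)) else none)
  let hentries := edges.filterMap
    (fun e => if e.1.1 ≠ e.2.1 then some (e.1.2, (min e.1.1 e.2.1, max e.1.1 e.2.1)) else none)
  let vertical_segments := pvGroup ventries
  let horizontal_segments := pvGroup hentries
  (vertical_segments, horizontal_segments,
   horizontal_segments.map (fun p => (p.1, pvPoints p.2)),
   vertical_segments.map (fun p => (p.1, pvPoints p.2)))

-- ===== PRECONDITION & SPEC =====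
-- A evaluates red_tiles[0], an IndexError on the empty list; Pre_ excludes exactly that input.
def Pre_build_boundaries (red_tiles : List (Int × Int)) : Prop := red_tiles ≠ []
instance (red_tiles : List (Int × Int)) : Decidable (Pre_build_boundaries red_tiles) := by unfold Pre_build_boundaries; infer_instance

def pvWitness_build_boundaries : (List (Int × Int)) := [(0, 0), (0, 2), (2, 2), (2, 0)]

-- On the empty list A raises IndexError (red_tiles[0]); B returns four empty dicts.
def Raises_build_boundaries (red_tiles : List (Int × Int)) : Prop := red_tiles = []
instance (red_tiles : List (Int × Int)) : Decidable (Raises_build_boundaries red_tiles) := by unfold Raises_build_boundaries; infer_instance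
def pvRaiseWitness_build_boundaries : (List (Int × Int)) := []
def pvRaiseWitnessOut_build_boundaries :
    (List (Int × List (Int × Int))) × (List (Int × List (Int × Int))) × (List (Int × List Int)) × (List (Int × List Int)) :=
  ([], [], [], [])

def Spec_build_boundaries (red_tiles : List (Int × Int))
    (out : (List (Int × List (Int × Int))) × (List (Int × List (Int × Int))) × (List (Int × List Int)) × (List (Int × List Int))) : Prop :=
  out = build_boundaries_alt red_tiles
instance (red_tiles : List (Int × Int)) (out : (List (Int × List (Int × Int))) × (List (Int × List (Int × Int))) × (List (Int × List Int)) × (List (Int × List Int))) : Decidable (Spec_build_boundaries red_tiles out) := by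
  unfold Spec_build_boundaries
  letI d1 : DecidableEq (List (Int × List (Int × Int))) := inferInstance
  letI d2 : DecidableEq (List (Int × List Int)) := inferInstance
  infer_instance

-- ===== CLAIM (what is proved, stated in full; the proofs are below) =====
def Claim_equal_build_boundaries : Prop := ∀ (red_tiles : List (Int × Int)), Dom_build_boundaries red_tiles → Pre_build_boundaries red_tiles → Spec_build_boundaries red_tiles (build_boundaries red_tiles)
def Claim_raises_build_boundaries : Prop := (∀ (red_tiles : List (Int × Int)), Dom_build_boundaries red_tiles → Raises_build_boundaries red_tiles → ¬ Pre_build_boundaries red_tiles) ∧ (Dom_build_boundaries (pvRaiseWitness_build_boundaries) ∧ Raises_build_boundaries (pvRaiseWitness_build_boundaries) ∧ build_boundaries_alt (pvRaiseWitness_build_boundaries) = pvRaiseWitnessOut_build_boundaries)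

-- ===== LEMMAS AND PROOFS =====

-- the single-dict grouping step hidden in both branches of pvStepA
def pvGStep (d : PySem.Dict Int (List (Int × Int))) (p : Int × (Int × Int)) :
    PySem.Dict Int (List (Int × Int)) := d.modify p.1 [] (· ++ [p.2])

-- B's entry extractors, named for the proofs
def pvVEnt (es : List ((Int × Int) × (Int × Int))) : List (Int × (Int × Int)) :=
  es.filterMap (fun e => if e.1.1 = e.2.1 then some (e.1.1, (min e.1.2 e.2.2, max e.1.2 e.2.2)) else none)
def pvHEnt (es : List ((Int × Int) × (Int × Int))) : List (Int × (Int × Int)) :=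
  es.filterMap (fun e => if e.1.1 ≠ e.2.1 then some (e.1.2, (min e.1.1 e.2.1, max e.1.1 e.2.1)) else none)

-- A's interleaved fold over the edges is the pair of independent grouping folds over B's entry lists
theorem pvFoldA_split (es : List ((Int × Int) × (Int × Int))) :
    ∀ (vs hs : PySem.Dict Int (List (Int × Int))),
      es.foldl pvStepA (vs, hs) = ((pvVEnt es).foldl pvGStep vs, (pvHEnt es).foldl pvGStep hs) := by
  induction es with
  | nil => intro vs hs; rfl
  | cons e rest ih =>
    intro vs hs
    obtain ⟨⟨x1, y1⟩, ⟨x2, y2⟩⟩ := e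
    by_cases hx : x1 = x2
    · simp only [List.foldl_cons, pvStepA, pvVEnt, pvHEnt, List.filterMap_cons, pvGStep,
        if_pos hx, if_neg (not_not_intro hx)]
      exact ih _ _
    · simp only [List.foldl_cons, pvStepA, pvVEnt, pvHEnt, List.filterMap_cons, pvGStep,
        if_neg hx, if_pos hx]
      exact ih _ _

-- keys of the grouping fold stay Nodup
theorem pvGFold_nodup (entries : List (Int × (Int × Int))) :
    (entries.foldl pvGStep PySem.Dict.empty).keys.Nodup := by
  have := PySem.Dict.nodup_keys_foldl_modify_key entries Prod.fst []
    (fun _ p => (· ++ [p.2])) PySem.Dict.empty (by simp [PySem.Dict.keys_empty])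
  simpa [pvGStep] using this

-- the items of A's grouping fold are exactly B's pvGroup
theorem pvGFold_items (entries : List (Int × (Int × Int))) :
    (entries.foldl pvGStep PySem.Dict.empty).items = pvGroup entries := by
  have hnd := pvGFold_nodup entries
  rw [PySem.Dict.items_eq_map_keys _ hnd []]
  have hkeys : (entries.foldl pvGStep PySem.Dict.empty).keys
      = PySem.Set.ofList (entries.map Prod.fst) := by
    have := PySem.Dict.keys_foldl_modify_key entries Prod.fst []
      (fun _ p => (· ++ [p.2])) PySem.Dict.empty
    simpa [pvGStep, PySem.Dict.keys_empty, PySem.Set.update_nil_left] using this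
  rw [hkeys]
  simp only [pvGroup, PySem.List.dedup_eq_ofList]
  apply List.map_congr_left
  intro k _
  have hfold : entries.foldl pvGStep PySem.Dict.empty
      = entries.foldl (fun d p => d.modify p.1 [] (· ++ [p.2])) PySem.Dict.empty := rfl
  rw [hfold, PySem.Dict.getD_foldl_modify_append]
  simp [PySem.Dict.getD_empty]

-- A's per-line points loop, on a dict with Nodup keys, maps pvPoints over the items
theorem pvPointsLoop_items (d : PySem.Dict Int (List (Int × Int))) (hnd : d.keys.Nodup) :
    (pvPointsLoop d).items = d.items.map (fun p => (p.1, pvPoints p.2)) := by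
  have h := PySem.Dict.items_foldl_insert_fresh (l := d.keys) (k := fun y => y)
    (v := fun y => PySem.Set.ofList ((d.getD y []).flatMap pvRangeOf)) (d := PySem.Dict.empty)
    (by intro a _; rfl) (by simpa using hnd)
  simp only [pvPointsLoop]
  rw [h]
  have hemp : (PySem.Dict.empty : PySem.Dict Int (List Int)).items = [] := rfl
  simp only [hemp, List.nil_append, PySem.Dict.keys, List.map_map]
  apply List.map_congr_left
  intro p hp
  have hget : d.getD p.1 [] = p.2 :=
    PySem.Dict.getD_of_mem_items d (by simpa using hp) hnd []
  simp [Function.comp, hget, pvPoints]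

-- ===== VERDICT (by name: the statement is the Claim_ definition above) =====
theorem build_boundaries_spec : Claim_equal_build_boundaries := by
  intro red_tiles _ hpre
  unfold Spec_build_boundaries
  cases red_tiles with
  | nil => exact absurd rfl hpre
  | cons h t =>
    show build_boundaries (h :: t) = build_boundaries_alt (h :: t)
    have hslice : PySem.List.slice (h :: t) none (some 1) = [h] := by
      rw [PySem.List.slice_to _ (b := 1) (by norm_num)]; rfl
    have hget : PySem.List.pyGetD (h :: t) 0 ((0 : Int), (0 : Int)) = h :=
      PySem.List.pyGetD_zero_cons _ _ _
    simp only [build_boundaries, build_boundaries_alt, hslice, hget]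
    set es := ((h :: t) ++ [h]).zip ((h :: t) ++ [h]).tail with hes
    rw [pvFoldA_split es PySem.Dict.empty PySem.Dict.empty]
    have hV := pvGFold_items (pvVEnt es)
    have hH := pvGFold_items (pvHEnt es)
    have hVn := pvGFold_nodup (pvVEnt es)
    have hHn := pvGFold_nodup (pvHEnt es)
    rw [show (pvVEnt es).foldl pvGStep PySem.Dict.empty
        = (pvVEnt es).foldl pvGStep PySem.Dict.empty from rfl]
    simp only [pvPointsLoop_items _ hVn, pvPointsLoop_items _ hHn, hV, hH]
    rfl

theorem build_boundaries_raises : Claim_raises_build_boundaries := by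
  unfold Claim_raises_build_boundaries
  constructor
  · intro red_tiles _ hr
    unfold Raises_build_boundaries at hr
    unfold Pre_build_boundaries
    simp [hr]
  · exact ⟨rfl, rfl, rfl⟩

-- witness self-check: the raise witness really lies outside Pre_
theorem build_boundaries_raises_witness_ok :
    ¬ Pre_build_boundaries pvRaiseWitness_build_boundaries :=
  build_boundaries_raises.1 pvRaiseWitness_build_boundaries rfl rfl
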